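-- pv_equiv track=rewrite | github.com/vipinkjonwal/pythonCodes | evilRec.py | evilNumber
-- ===== SOURCE A (Python) =====
-- def evilNumber(number,count = 0):
--     '''
--     Objective           : To check whether the number is Evil Number or not.
--     Input Variables     :
--            :param number: Given number to check if evil or not.
--             :param count: Default - 0 | To maintain count of number of 1's.
--     Return Value        : Bool Value, whether number if Evil or Not
--     '''
--     if number == 0:
--         if count%2 == 0:
--             return True
--         else:
--             return  False
--     else:
--         if number%2 == 1:
--             count += 1
--         number = number//2
--         return(evilNumber(number,count))
-- ===== SOURCE B (Python) =====
-- def evilNumber(number, count=0):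
--     parity = count % 2 == 0
--     while number:
--         if number & 1:
--             parity = not parity
--         number >>= 1
--     return parity
-- ===== Notes on version B (the rewrite author's own statement) =====
-- stated objective: alternative
-- what changed: Replaces the tail recursion carrying an integer count (parity tested once in the base case) with an iterative bitwise loop (& 1, >>= 1) that maintains only a single boolean parity flag toggled on each set bit.
import Mathlib
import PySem

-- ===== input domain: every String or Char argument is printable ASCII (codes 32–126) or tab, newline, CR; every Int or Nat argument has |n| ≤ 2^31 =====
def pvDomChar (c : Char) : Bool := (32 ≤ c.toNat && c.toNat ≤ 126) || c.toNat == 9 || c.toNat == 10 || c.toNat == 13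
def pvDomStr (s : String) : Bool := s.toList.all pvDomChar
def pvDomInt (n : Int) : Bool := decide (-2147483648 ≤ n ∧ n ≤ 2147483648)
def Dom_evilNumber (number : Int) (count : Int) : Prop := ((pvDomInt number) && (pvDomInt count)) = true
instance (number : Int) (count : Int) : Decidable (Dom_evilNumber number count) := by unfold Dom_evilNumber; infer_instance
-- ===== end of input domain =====

-- B replaces A's tail recursion carrying an integer count by an iterative bitwise loop toggling a single boolean parity flag (objective: alternative).


-- ===== PORT A =====
-- Literal port of A's tail recursion. For negative `number` the Python recursion never
-- reaches the base case (RecursionError), excluded by Pre_; the guard `0 < number` only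
-- makes the Lean recursion total there (the value `false` there is never claimed).
def evilNumber (number : Int) (count : Int) : Bool :=
  if number = 0 then
    (if PySem.Int.mod count 2 = 0 then true else false)
  else if h : 0 < number then
    evilNumber (PySem.Int.floordiv number 2)
      (if PySem.Int.mod number 2 = 1 then count + 1 else count)
  else false
termination_by number.natAbs
decreasing_by
  have h2 : PySem.Int.floordiv number 2 = number / 2 := by
    simp [PySem.Int.floordiv, Int.fdiv_eq_ediv]
  rw [h2]
  omega

-- ===== PORT B =====
-- Source B's while loop over the bits, flipping the boolean `parity` on each set bit.
-- On nonnegative Python ints `number & 1` is `number % 2` and `number >> 1` is `number // 2`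
-- (exact); negatives (where Source B's loop never terminates) are totalised to `false`, a value
-- never claimed. The loop runs on the Nat image of `number`, so `/` and `%` here are exact.
def evilBitLoop (n : Nat) (parity : Bool) : Bool :=
  if h : n = 0 then parity
  else evilBitLoop (n / 2) (if n % 2 = 1 then !parity else parity)
termination_by n
decreasing_by exact Nat.div_lt_self (Nat.pos_of_ne_zero h) (by norm_num)

def evilNumber_alt (number : Int) (count : Int) : Bool :=
  if number < 0 then false
  else evilBitLoop number.toNat (PySem.Int.mod count 2 = 0)

-- ===== PRECONDITION & SPEC =====
-- Pre_ excludes negative `number`: there A recurses to RecursionError (and B's loop never terminates).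
def Pre_evilNumber (number : Int) (count : Int) : Prop := 0 ≤ number
instance (number : Int) (count : Int) : Decidable (Pre_evilNumber number count) := by unfold Pre_evilNumber; infer_instance
def pvWitness_evilNumber : Int × Int := (9, 0)

def Spec_evilNumber (number : Int) (count : Int) (out : Bool) : Prop := out = evilNumber_alt number count
instance (number : Int) (count : Int) (out : Bool) : Decidable (Spec_evilNumber number count out) := by unfold Spec_evilNumber; infer_instance

-- ===== CLAIM =====
def Claim_equal_evilNumber : Prop := ∀ (number : Int) (count : Int), Dom_evilNumber number count → Pre_evilNumber number count → Spec_evilNumber number count (evilNumber number count)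

-- ===== LEMMAS AND PROOFS =====
theorem pymod2_succ (c : Int) :
    (decide (PySem.Int.mod (c + 1) 2 = 0)) = !(decide (PySem.Int.mod c 2 = 0)) := by
  have h1 : PySem.Int.mod c 2 = c % 2 := PySem.Int.mod_eq_emod_of_pos (by norm_num)
  have h2 : PySem.Int.mod (c + 1) 2 = (c + 1) % 2 := PySem.Int.mod_eq_emod_of_pos (by norm_num)
  rw [h1, h2]
  rcases Int.emod_two_eq_zero_or_one c with h | h
  · have h2 : (c + 1) % 2 = 1 := by omega
    simp [h, h2]
  · have h2 : (c + 1) % 2 = 0 := by omega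
    simp [h, h2]

theorem evilNumber_eq_bitLoop : ∀ (n : Nat) (c : Int),
    evilNumber (n : Int) c = evilBitLoop n (PySem.Int.mod c 2 = 0) := by
  intro n
  induction n using Nat.strong_induction_on with
  | _ n ih =>
    intro c
    by_cases h0 : n = 0
    · subst h0
      rw [evilNumber, evilBitLoop]
      simp
    · have hpos : (0:Int) < (n:Int) := by exact_mod_cast Nat.pos_of_ne_zero h0
      rw [evilNumber, if_neg (by exact_mod_cast h0), dif_pos hpos,
          evilBitLoop, dif_neg h0]
      have hdiv : PySem.Int.floordiv (n : Int) 2 = ((n / 2 : Nat) : Int) :=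
        PySem.Int.floordiv_natCast n 2
      have hmod : PySem.Int.mod (n : Int) 2 = ((n % 2 : Nat) : Int) :=
        PySem.Int.mod_natCast n 2
      rw [hdiv, hmod]
      rw [ih (n / 2) (Nat.div_lt_self (Nat.pos_of_ne_zero h0) (by norm_num))]
      by_cases hm : n % 2 = 1
      · have : ((n % 2 : Nat) : Int) = 1 := by exact_mod_cast hm
        rw [if_pos this, if_pos hm]
        congr 1
        have := pymod2_succ c
        simpa using this
      · have : ¬ ((n % 2 : Nat) : Int) = 1 := by exact_mod_cast hm
        rw [if_neg this, if_neg hm]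

-- ===== VERDICT =====
theorem evilNumber_spec : Claim_equal_evilNumber := by
  intro number count _ hpre
  unfold Pre_evilNumber at hpre
  unfold Spec_evilNumber evilNumber_alt
  rw [if_neg (by omega)]
  have h : number = (number.toNat : Int) := (Int.toNat_of_nonneg hpre).symm
  rw [h]
  exact evilNumber_eq_bitLoop number.toNat count
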